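-- pv_equiv track=rewrite | github.com/snowcrab382/Algorithm_Solution | 프로그래머스/4/17685. ［3차］ 자동완성/［3차］ 자동완성.py | solution
-- ===== SOURCE A (Python) =====
-- def solution(words):
--     words.sort()
--     n = len(words)
--     result = [0] * n
--     for i in range(n - 1):
--         a = len(words[i])
--         b = len(words[i + 1])
--         for j in range(min(a, b)):
--             if words[i][j] != words[i + 1][j]:
--                 j -= 1
--                 break
--         result[i] = max(result[i], min(a, j + 2))
--         result[i + 1] = max(result[i + 1], min(b, j + 2))
--
--     return sum(result)
-- ===== SOURCE B (Python) =====
-- def solution(words):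
--     # Prefix-count (flattened trie): no sorting; count how many words share each
--     # prefix, then a word needs k keystrokes for the shortest uniquely-owned
--     # prefix (or its full length). Note: A sorts `words` in place; B does not
--     # mutate its argument (equivalence is about the return value only).
--     cnt = {}
--     for w in words:
--         for k in range(1, len(w) + 1):
--             p = w[:k]
--             cnt[p] = cnt.get(p, 0) + 1
--     total = 0
--     for w in words:
--         presses = len(w)
--         for k in range(1, len(w) + 1):
--             if cnt[w[:k]] == 1:
--                 presses = k
--                 break
--         total += presses
--     return total
-- ===== Notes on version B (the rewrite author's own statement) =====
-- stated objective: alternative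
-- what changed: A sorts the list and rescans characters of each adjacent sorted pair into a mutable result array; B never sorts: it builds a prefix counter (a flattened trie) over all word prefixes in one pass and reads each word's keystroke count as its shortest uniquely-owned prefix.
-- intended difference: On a one-element list with a nonempty word A returns 0, but one keystroke is needed to type any word, so B returns 1 — the intended count. — e.g. on solution(["ab"]): A returns 0, B returns 1
import Mathlib
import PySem

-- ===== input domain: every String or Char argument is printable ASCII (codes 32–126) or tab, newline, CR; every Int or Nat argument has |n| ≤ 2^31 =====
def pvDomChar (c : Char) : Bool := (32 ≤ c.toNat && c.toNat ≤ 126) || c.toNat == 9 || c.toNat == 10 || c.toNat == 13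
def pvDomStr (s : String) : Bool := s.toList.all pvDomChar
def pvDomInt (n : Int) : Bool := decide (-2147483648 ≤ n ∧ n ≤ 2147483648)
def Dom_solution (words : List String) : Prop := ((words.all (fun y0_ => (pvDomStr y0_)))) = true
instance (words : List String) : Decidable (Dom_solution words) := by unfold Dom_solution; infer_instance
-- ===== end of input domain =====

-- B replaces A's sort + adjacent-pair rescans by a sort-free prefix counter (a
-- flattened trie); equivalence is about the RETURN value only (A sorts its
-- argument in place, B does not mutate it).

-- ===== PORT A =====
-- inner loop: `for j in range(min(a,b)): if words[i][j] != words[i+1][j]: j -= 1; break`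
-- (the incoming Int is Python's leaked `j`; under Pre_ the range is never empty,
-- so the initial value 0 fed in by `solution` is never read where A would
-- instead raise NameError — those inputs are outside Pre_)
def solAFind (u v : List Char) : List Nat → Int → Int
  | [], j => j
  | jj :: rest, _ =>
      if u.getD jj ' ' ≠ v.getD jj ' ' then (jj : Int) - 1
      else solAFind u v rest (jj : Int)

-- outer loop: `for i in range(n - 1): …` threading (result, j)
def solALoop (ws : List String) : List Nat → (List Int × Int) → (List Int × Int)
  | [], st => st
  | i :: rest, (result, j0) =>
      let a := (ws.getD i "").toList.length
      let b := (ws.getD (i+1) "").toList.length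
      let j := solAFind (ws.getD i "").toList (ws.getD (i+1) "").toList (List.range (min a b)) j0
      let r1 := result.set i (max (result.getD i 0) (min (a : Int) (j+2)))
      let r2 := r1.set (i+1) (max (r1.getD (i+1) 0) (min (b : Int) (j+2)))
      solALoop ws rest (r2, j)

def solution (words : List String) : Int :=
  let ws := PySem.List.sorted words (fun w => w) false
  let n := ws.length
  ((solALoop ws (List.range (n-1)) (List.replicate n (0:Int), 0)).1).sum

-- ===== PORT B =====
-- cnt: for w in words: for k in range(1, len(w)+1): cnt[w[:k]] = cnt.get(w[:k], 0) + 1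
def solBCount (words : List String) : PySem.Dict (List Char) Int :=
  words.foldl (fun cnt w =>
    (List.range' 1 w.toList.length).foldl (fun cnt k =>
      let p := w.toList.take k
      cnt.insert p (cnt.getD p 0 + 1)) cnt) PySem.Dict.empty

-- per-word loop: first k in 1..len(w) with cnt[w[:k]] == 1, else len(w)
def solBPress (cnt : PySem.Dict (List Char) Int) (w : List Char) : List Nat → Int → Int
  | [], presses => presses
  | k :: rest, presses =>
      if cnt.getD (w.take k) 0 == 1 then (k : Int)
      else solBPress cnt w rest presses

def solution_alt (words : List String) : Int :=
  let cnt := solBCount words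
  words.foldl (fun total w =>
    total + solBPress cnt w.toList (List.range' 1 w.toList.length) (w.toList.length : Int)) 0

-- ===== PRECONDITION & SPEC =====
-- Pre_ excludes lists of two or more words containing an empty string: there A's
-- inner loop never runs on the first sorted pair and A raises NameError (unbound j).
def Pre_solution (words : List String) : Prop :=
  words.length ≤ 1 ∨ ∀ w ∈ words, w ≠ ""
instance (words : List String) : Decidable (Pre_solution words) := by unfold Pre_solution; infer_instance
def pvWitness_solution : List String := (["go", "gone", "guild"])

-- On a one-element list with a nonempty word A returns 0, but one keystroke is
-- needed to type the word, so B returns 1 — the intended count.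
def D_solution (words : List String) : Prop := words.length = 1 ∧ ¬ ("" ∈ words)
instance (words : List String) : Decidable (D_solution words) := by unfold D_solution; infer_instance

def Spec_solution (words : List String) (out : Int) : Prop := ¬ D_solution words → out = solution_alt words
instance (words : List String) (out : Int) : Decidable (Spec_solution words out) := by unfold Spec_solution; infer_instance

def pvDiffWitness_solution : List String := (["ab"])
def pvDiffWitnessOut_solution : Int × Int := (0, 1)

-- ===== CLAIM (what is proved, stated in full; the proofs are below) =====
def Claim_unchanged_solution : Prop := ∀ (words : List String), Dom_solution words → Pre_solution words → Spec_solution words (solution words)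
def Claim_changed_solution : Prop := Dom_solution (pvDiffWitness_solution) ∧ Pre_solution (pvDiffWitness_solution) ∧ D_solution (pvDiffWitness_solution) ∧ solution (pvDiffWitness_solution) = pvDiffWitnessOut_solution.1 ∧ solution_alt (pvDiffWitness_solution) = pvDiffWitnessOut_solution.2 ∧ pvDiffWitnessOut_solution.1 ≠ pvDiffWitnessOut_solution.2
def Claim_exact_solution : Prop := ∀ (words : List String), Dom_solution words → Pre_solution words → D_solution words → solution words ≠ solution_alt words

-- ===== LEMMAS AND PROOFS =====
def lcp : List Char → List Char → Nat
  | a :: as, b :: bs => if a = b then lcp as bs + 1 else 0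
  | _, _ => 0

theorem lcp_comm (a b : List Char) : lcp a b = lcp b a := by
  induction a generalizing b with
  | nil => cases b <;> simp [lcp]
  | cons x as ih =>
    cases b with
    | nil => simp [lcp]
    | cons y bs =>
      by_cases h : x = y
      · subst h; simp [lcp, ih]
      · simp [lcp, h, Ne.symm h]

theorem lcp_le_left (a b : List Char) : lcp a b ≤ a.length := by
  induction a generalizing b with
  | nil => cases b <;> simp [lcp]
  | cons x as ih =>
    cases b with
    | nil => simp [lcp]
    | cons y bs =>
      by_cases h : x = y <;> simp [lcp, h]
      exact ih bs

theorem lcp_le_right (a b : List Char) : lcp a b ≤ b.length := by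
  rw [lcp_comm]; exact lcp_le_left b a

theorem le_lcp_iff {k : ℕ} {a b : List Char} (ha : k ≤ a.length) :
    k ≤ lcp a b ↔ a.take k = b.take k := by
  induction a generalizing b k with
  | nil => simp_all
  | cons x as ih =>
    cases k with
    | zero => simp
    | succ k =>
      cases b with
      | nil => simp [lcp]
      | cons y bs =>
        by_cases h : x = y
        · subst h
          simp [lcp, List.take_succ_cons, ih (by simpa using ha)]
        · simp [lcp, h]

theorem take_prefix_iff {k : ℕ} {a b : List Char} (ha : k ≤ a.length) :
    a.take k <+: b ↔ k ≤ lcp a b := by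
  rw [le_lcp_iff ha]
  constructor
  · intro h
    have := List.prefix_iff_eq_take.mp h
    rw [this, List.length_take]
    congr 1
    omega
  · intro h
    rw [h]
    exact List.take_prefix k b
def maxLcp (w : List Char) (l : List (List Char)) : Nat :=
  l.foldr (fun v m => max (lcp w v) m) 0

theorem maxLcp_lt_iff {w : List Char} {l : List (List Char)} {k : ℕ} (hk : 0 < k) :
    maxLcp w l < k ↔ ∀ v ∈ l, lcp w v < k := by
  induction l with
  | nil => simpa [maxLcp]
  | cons x xs ih =>
    show max (lcp w x) (maxLcp w xs) < k ↔ _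
    rw [Nat.max_lt, ih]
    simp

theorem le_maxLcp {w v : List Char} {l : List (List Char)} (h : v ∈ l) :
    lcp w v ≤ maxLcp w l := by
  induction l with
  | nil => simp at h
  | cons x xs ih =>
    rcases List.mem_cons.mp h with h | h
    · subst h; simp [maxLcp]
    · simp [maxLcp]; right; simpa [maxLcp] using ih h

theorem maxLcp_le {w : List Char} {l : List (List Char)} {m : ℕ}
    (h : ∀ v ∈ l, lcp w v ≤ m) : maxLcp w l ≤ m := by
  induction l with
  | nil => simp [maxLcp]
  | cons x xs ih => simp_all [maxLcp]

theorem maxLcp_perm {w : List Char} {l l' : List (List Char)} (h : l.Perm l') :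
    maxLcp w l = maxLcp w l' := by
  exact le_antisymm (maxLcp_le fun v hv => le_maxLcp (h.subset hv))
    (maxLcp_le fun v hv => le_maxLcp (h.symm.subset hv))
theorem prefixes_count (w : String) (p : List Char) (hp : p ≠ []) :
    ((List.range' 1 w.toList.length).map (w.toList.take ·)).count p
      = if p <+: w.toList then 1 else 0 := by
  rw [List.count_eq_countP, List.countP_map]
  by_cases hpre : p <+: w.toList
  · have hlen : p.length ≤ w.toList.length := hpre.length_le
    have htake : w.toList.take p.length = p := (List.prefix_iff_eq_take.mp hpre).symm
    have h1 : 1 ≤ p.length := by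
      cases p with
      | nil => exact absurd rfl hp
      | cons _ _ => simp
    rw [if_pos hpre]
    have : ∀ k ∈ List.range' 1 w.toList.length,
        (fun k => w.toList.take k == p) k = (k == p.length) := by
      intro k hk
      rw [List.mem_range'_1] at hk
      rw [Bool.eq_iff_iff]
      simp only [beq_iff_eq]
      constructor <;> intro h
      · have h2 := congrArg List.length h
        rw [List.length_take, Nat.min_eq_left (by omega)] at h2
        exact h2
      · subst h; exact htake
    rw [List.countP_congr (q := fun k => k == p.length)
        (by intro k hk; have h3 := this k hk; simp only [Function.comp_apply] at *; rw [h3])]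
    rw [← List.count_eq_countP]
    exact List.count_eq_one_of_mem (List.nodup_range') (by rw [List.mem_range'_1]; omega)
  · rw [if_neg hpre, List.countP_eq_zero]
    intro k hk
    rw [List.mem_range'_1] at hk
    intro h
    simp only [Function.comp, beq_iff_eq] at h
    exact hpre (h ▸ List.take_prefix k w.toList)
theorem solBCount_getD_aux (words : List String) (d : PySem.Dict (List Char) Int)
    (p : List Char) (hp : p ≠ []) :
    (words.foldl (fun cnt w =>
      (List.range' 1 w.toList.length).foldl (fun cnt k =>
        let p := w.toList.take k
        cnt.insert p (cnt.getD p 0 + 1)) cnt) d).getD p 0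
      = d.getD p 0 + (words.countP (fun w => decide (p <+: w.toList)) : Int) := by
  induction words generalizing d with
  | nil => simp
  | cons w rest ih =>
    rw [List.foldl_cons, ih]
    have hinner : ((List.range' 1 w.toList.length).foldl (fun cnt k =>
        let p := w.toList.take k
        cnt.insert p (cnt.getD p 0 + 1)) d).getD p 0
        = d.getD p 0 + (((List.range' 1 w.toList.length).map (w.toList.take ·)).count p : Int) := by
      rw [show ((List.range' 1 w.toList.length).foldl (fun cnt k =>
          let p := w.toList.take k
          cnt.insert p (cnt.getD p 0 + 1)) d)
        = (((List.range' 1 w.toList.length).map (w.toList.take ·)).foldl (fun cnt x =>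
          cnt.insert x (cnt.getD x 0 + 1)) d) from by rw [List.foldl_map]]
      exact PySem.Dict.getD_foldl_insert_add_one _ _ _
    rw [hinner, prefixes_count w p hp, List.countP_cons]
    by_cases hpre : p <+: w.toList <;> simp [hpre] <;> push_cast <;> ring
theorem solBPress_scan (cnt : PySem.Dict (List Char) Int) (w : List Char) (M : ℕ)
    (c : ℕ) : ∀ s : ℕ, 1 ≤ s → s + c = w.length + 1 → s ≤ M + 1 →
    (∀ k, s ≤ k → k ≤ w.length → ((cnt.getD (w.take k) 0 == 1) = decide (M < k))) →
    solBPress cnt w (List.range' s c) (w.length : Int) = ((min w.length (M + 1) : ℕ) : Int) := by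
  induction c with
  | zero =>
    intro s h1 hs hsM hch
    simp only [List.range'_zero, solBPress]
    congr 1
    omega
  | succ c ih =>
    intro s h1 hs hsM hch
    rw [List.range'_succ]
    rw [solBPress]
    rw [hch s le_rfl (by omega)]
    by_cases hM : M < s
    · rw [if_pos (by simpa using hM)]
      have : s = M + 1 := by omega
      subst this
      congr 1
      omega
    · rw [if_neg (by simpa using hM)]
      exact ih (s+1) (by omega) (by omega) (by omega)
        (fun k hk1 hk2 => hch k (by omega) hk2)
def contribN (w : String) (others : List String) : Nat :=
  min w.toList.length (maxLcp w.toList (others.map String.toList) + 1)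

def T (ws : List String) : Int :=
  (ws.map (fun w => (contribN w (ws.erase w) : Int))).sum

theorem press_eq_contrib (ws : List String) (w : String) (hw : w ∈ ws) :
    solBPress (solBCount ws) w.toList (List.range' 1 w.toList.length) (w.toList.length : Int)
      = (contribN w (ws.erase w) : Int) := by
  set M := maxLcp w.toList ((ws.erase w).map String.toList) with hM
  have hch : ∀ k, 1 ≤ k → k ≤ w.toList.length →
      (((solBCount ws).getD (w.toList.take k) 0 == 1) = decide (M < k)) := by
    intro k hk1 hk2
    have hne : w.toList.take k ≠ [] := by
      intro h
      have := congrArg List.length h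
      rw [List.length_take, List.length_nil] at this
      omega
    unfold solBCount
    rw [solBCount_getD_aux ws PySem.Dict.empty _ hne]
    rw [show (PySem.Dict.empty (κ := List Char) (ν := Int)).getD (w.toList.take k) 0 = 0 from rfl, zero_add]
    have hperm : ws.Perm (w :: ws.erase w) := List.perm_cons_erase hw
    rw [hperm.countP_eq, List.countP_cons]
    have hself : decide (w.toList.take k <+: w.toList) = true := by
      simp [List.take_prefix]
    rw [hself]
    have herase : (ws.erase w).countP (fun v => decide (w.toList.take k <+: v.toList)) = 0
        ↔ M < k := by
      rw [List.countP_eq_zero]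
      rw [maxLcp_lt_iff (by omega)]
      constructor
      · intro h v hv
        rw [List.mem_map] at hv
        obtain ⟨x, hx, rfl⟩ := hv
        have := h x hx
        simp only [decide_eq_true_eq] at this
        by_contra hc
        exact this ((take_prefix_iff (by omega)).mpr (by omega))
      · intro h v hv
        simp only [decide_eq_true_eq]
        intro hpre
        have hk := (take_prefix_iff (a := w.toList) (b := v.toList) (by omega)).mp hpre
        have := h v.toList (List.mem_map_of_mem hv)
        omega
    rw [Bool.eq_iff_iff]
    simp only [beq_iff_eq, decide_eq_true_eq]
    constructor
    · intro h
      apply herase.mp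
      simp only [if_true] at h
      omega
    · intro h
      have h0 := herase.mpr h
      simp only [if_true]
      omega
  rw [solBPress_scan (solBCount ws) w.toList M w.toList.length 1 le_rfl (by omega) (by omega) hch]
  rfl

theorem B_eq_T (ws : List String) : solution_alt ws = T ws := by
  show ws.foldl _ 0 = _
  rw [show (ws.foldl (fun total w =>
      total + solBPress (solBCount ws) w.toList (List.range' 1 w.toList.length)
        (w.toList.length : Int)) 0)
    = (ws.map (fun w => solBPress (solBCount ws) w.toList (List.range' 1 w.toList.length)
        (w.toList.length : Int))).sum from by
      rw [PySem.List.foldl_add]; rw [zero_add]]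
  unfold T
  apply congrArg
  exact List.map_congr_left (fun w hw => press_eq_contrib ws w hw)
theorem T_perm {ws vs : List String} (h : ws.Perm vs) : T ws = T vs := by
  unfold T
  have h1 : ws.map (fun w => (contribN w (ws.erase w) : Int))
      = ws.map (fun w => (contribN w (vs.erase w) : Int)) := by
    apply List.map_congr_left
    intro w _
    unfold contribN
    rw [maxLcp_perm ((h.erase w).map String.toList)]
  rw [h1]
  exact (h.map _).sum_eq
theorem char_step {u v : List Char} {s : ℕ} (hu : s < u.length) (hv : s < v.length)
    (hpre : u.take s = v.take s) :
    (u.getD s ' ' = v.getD s ' ') ↔ u.take (s+1) = v.take (s+1) := by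
  rw [List.getD_eq_getElem u ' ' hu, List.getD_eq_getElem v ' ' hv]
  have h1 : u.take (s+1) = u.take s ++ [u[s]] := by
    rw [List.take_add_one, List.getElem?_eq_getElem hu]; rfl
  have h2 : v.take (s+1) = v.take s ++ [v[s]] := by
    rw [List.take_add_one, List.getElem?_eq_getElem hv]; rfl
  rw [h1]; rw [h2]; rw [hpre]
  constructor
  · intro h; rw [h]
  · intro h
    have h3 := List.append_cancel_left h
    simpa using h3

theorem solAFind_scan (u v : List Char) (c : ℕ) : ∀ (s : ℕ) (j0 : Int),
    s + c = min u.length v.length → 1 ≤ c → u.take s = v.take s →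
    solAFind u v (List.range' s c) j0 = (lcp u v : Int) - 1 := by
  induction c with
  | zero => intro s j0 _ h1 _; omega
  | succ c ih =>
    intro s j0 hsc h1 hpre
    have hsu : s < u.length := by omega
    have hsv : s < v.length := by omega
    have hslcp : s ≤ lcp u v := (le_lcp_iff (by omega)).mpr hpre
    rw [List.range'_succ, solAFind]
    by_cases hch : u.getD s ' ' = v.getD s ' '
    · rw [if_neg (by simpa using hch)]
      have hsucc : s + 1 ≤ lcp u v :=
        (le_lcp_iff (by omega)).mpr ((char_step hsu hsv hpre).mp hch)
      rcases Nat.eq_zero_or_pos c with hc | hc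
      · subst hc
        simp only [List.range'_zero, solAFind]
        have : lcp u v ≤ min u.length v.length := le_min (lcp_le_left u v) (lcp_le_right u v)
        have : lcp u v = s + 1 := by omega
        omega
      · exact ih (s+1) s (by omega) hc ((char_step hsu hsv hpre).mp hch)
    · rw [if_pos (by simpa using hch)]
      have : ¬ (s + 1 ≤ lcp u v) := by
        intro hc
        exact hch ((char_step hsu hsv hpre).mpr ((le_lcp_iff (by omega)).mp hc))
      have : lcp u v = s := by omega
      omega
theorem cons_le_cons_iff (x y : Char) (as bs : List Char) :
    (x :: as) ≤ (y :: bs) ↔ x < y ∨ (x = y ∧ as ≤ bs) := by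
  rw [le_iff_lt_or_eq, le_iff_lt_or_eq]
  constructor
  · rintro (h | h)
    · cases h with
      | cons h => exact Or.inr ⟨rfl, Or.inl h⟩
      | rel h => exact Or.inl h
    · rw [List.cons.injEq] at h
      exact Or.inr ⟨h.1, Or.inr h.2⟩
  · rintro (h | ⟨rfl, h | h⟩)
    · exact Or.inl (List.Lex.rel h)
    · exact Or.inl (List.Lex.cons h)
    · exact Or.inr (by rw [h])
theorem nil_not_cons_le (x : Char) (as : List Char) : ¬ ((x :: as) ≤ ([] : List Char)) := by
  intro h
  rw [le_iff_lt_or_eq] at h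
  rcases h with h | h
  · cases h
  · simp at h
theorem lcp_mono_of_le {a b c : List Char} (hab : a ≤ b) (hbc : b ≤ c) :
    lcp a c ≤ lcp a b ∧ lcp a c ≤ lcp b c := by
  induction a generalizing b c with
  | nil => cases c <;> simp [lcp]
  | cons x as ih =>
    cases c with
    | nil => constructor <;> cases b <;> simp [lcp]
    | cons z cs =>
      by_cases hxz : x = z
      · subst hxz
        cases b with
        | nil => exact absurd hab (nil_not_cons_le x as)
        | cons y bs =>
          rcases (cons_le_cons_iff _ _ _ _).mp hab with hlt | ⟨heq, hab'⟩
          · rcases (cons_le_cons_iff _ _ _ _).mp hbc with hlt2 | ⟨heq2, _⟩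
            · exact absurd (lt_trans hlt hlt2) (lt_irrefl _)
            · exact absurd (heq2 ▸ hlt) (lt_irrefl _)
          · subst heq
            rcases (cons_le_cons_iff _ _ _ _).mp hbc with hlt2 | ⟨_, hbc'⟩
            · exact absurd hlt2 (lt_irrefl _)
            · have := ih hab' hbc'
              simp [lcp]
              omega
      · simp [lcp, hxz]
theorem sum_eq_sum_getD (l : List Int) :
    l.sum = ∑ k ∈ Finset.range l.length, l.getD k 0 := by
  induction l with
  | nil => simp
  | cons x xs ih =>
    rw [List.sum_cons, List.length_cons, Finset.sum_range_succ', ih]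
    simp [List.getD_cons_succ, List.getD_cons_zero]
    ring

theorem map_sum_index (l : List String) (f : String → Int) :
    (l.map f).sum = ∑ k ∈ Finset.range l.length, f (l.getD k "") := by
  induction l with
  | nil => simp
  | cons x xs ih =>
    rw [List.map_cons, List.sum_cons, List.length_cons, Finset.sum_range_succ', ih]
    simp [List.getD_cons_succ, List.getD_cons_zero]
    ring
def lenW (vs : List String) (k : ℕ) : ℤ := ((vs.getD k "").toList.length : ℤ)
def Lp (vs : List String) (k : ℕ) : ℤ :=
  (lcp (vs.getD k "").toList (vs.getD (k+1) "").toList : ℤ)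
def leftL (vs : List String) (k : ℕ) : ℤ := if k = 0 then 0 else Lp vs (k-1)
def valA (vs : List String) (t k : ℕ) : ℤ :=
  if k < t then min (lenW vs k) (1 + max (leftL vs k) (Lp vs k))
  else if 1 ≤ t ∧ k = t then min (lenW vs k) (1 + Lp vs (k-1)) else 0

theorem lenW_pos (vs : List String) (k : ℕ) (hk : k < vs.length)
    (hne : ∀ w ∈ vs, w ≠ "") : 1 ≤ lenW vs k := by
  unfold lenW
  rw [List.getD_eq_getElem _ _ hk]
  have hmem : vs[k] ∈ vs := List.getElem_mem hk
  have := hne _ hmem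
  have hnil : vs[k].toList ≠ [] := by
    intro h
    apply this
    have h2 := congrArg String.ofList h
    simpa using h2
  have := List.length_pos_of_ne_nil hnil
  omega

theorem Lp_nonneg (vs : List String) (k : ℕ) : 0 ≤ Lp vs k := Int.natCast_nonneg _
theorem loop_inv (vs : List String) (hne : ∀ w ∈ vs, w ≠ "") (h2 : 2 ≤ vs.length) (c : ℕ) :
    ∀ (s : ℕ) (res : List Int) (j0 : Int),
    s + c = vs.length - 1 → res.length = vs.length →
    (∀ k, k < vs.length → res.getD k 0 = valA vs s k) →
    (solALoop vs (List.range' s c) (res, j0)).1.length = vs.length ∧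
    ∀ k, k < vs.length → (solALoop vs (List.range' s c) (res, j0)).1.getD k 0
      = valA vs (vs.length - 1) k := by
  induction c with
  | zero =>
    intro s res j0 hs hlen hinv
    have : s = vs.length - 1 := by omega
    subst this
    simpa [solALoop] using ⟨hlen, hinv⟩
  | succ c ih =>
    intro s res j0 hs hlen hinv
    have hsn : s < vs.length - 1 := by omega
    have ha : 1 ≤ lenW vs s := lenW_pos vs s (by omega) hne
    have hb : 1 ≤ lenW vs (s+1) := lenW_pos vs (s+1) (by omega) hne
    rw [List.range'_succ]
    show (solALoop vs (s :: List.range' (s+1) c) (res, j0)).1.length = vs.length ∧ _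
    rw [solALoop]
    have hj : solAFind (vs.getD s "").toList (vs.getD (s+1) "").toList
        (List.range (min (vs.getD s "").toList.length (vs.getD (s+1) "").toList.length)) j0
        = Lp vs s - 1 := by
      rw [List.range_eq_range']
      have hres := solAFind_scan (vs.getD s "").toList (vs.getD (s+1) "").toList
        (min (vs.getD s "").toList.length (vs.getD (s+1) "").toList.length) 0 j0
        (by omega) (by unfold lenW at ha hb; omega) (by simp)
      simpa [Lp] using hres
    rw [hj]
    set a := (vs.getD s "").toList.length with hadef
    set b := (vs.getD (s+1) "").toList.length with hbdef
    set r1 := res.set s (max (res.getD s 0) (min (a : Int) (Lp vs s - 1 + 2))) with hr1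
    set r2 := r1.set (s+1) (max (r1.getD (s+1) 0) (min (b : Int) (Lp vs s - 1 + 2))) with hr2
    have hlen1 : r1.length = vs.length := by rw [hr1, List.length_set]; exact hlen
    have hlen2 : r2.length = vs.length := by rw [hr2, List.length_set]; exact hlen1
    have hinv' : ∀ k, k < vs.length → r2.getD k 0 = valA vs (s+1) k := by
      intro k hk
      by_cases hks : k = s
      · subst hks
        have e1 : r2.getD k 0 = r1.getD k 0 := by
          rw [hr2, List.getD_eq_getElem?_getD, List.getElem?_set_ne (by omega)]
          rfl
        have e2 : r1.getD k 0 = max (res.getD k 0) (min (a : Int) (Lp vs k - 1 + 2)) := by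
          rw [hr1, List.getD_eq_getElem?_getD, List.getElem?_set_self (by omega)]
          rfl
        have ha' : 1 ≤ (a : ℤ) := ha
        rw [e1, e2, hinv k (by omega)]
        unfold valA leftL lenW
        rw [← hadef]
        have h0 := Lp_nonneg vs k
        have h1 := Lp_nonneg vs (k-1)
        split_ifs <;> omega
      · by_cases hks1 : k = s+1
        · subst hks1
          have e1 : r2.getD (s+1) 0 = max (r1.getD (s+1) 0) (min (b : Int) (Lp vs s - 1 + 2)) := by
            rw [hr2, List.getD_eq_getElem?_getD, List.getElem?_set_self (by omega)]
            rfl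
          have e2 : r1.getD (s+1) 0 = res.getD (s+1) 0 := by
            rw [hr1, List.getD_eq_getElem?_getD, List.getElem?_set_ne (by omega)]
            rfl
          have hb' : 1 ≤ (b : ℤ) := hb
          rw [e1, e2, hinv (s+1) (by omega)]
          have hval0 : valA vs s (s+1) = 0 := by
            unfold valA
            rw [if_neg (by omega), if_neg]
            rintro ⟨_, hq⟩
            omega
          have hval1 : valA vs (s+1) (s+1) = min (lenW vs (s+1)) (1 + Lp vs s) := by
            unfold valA
            rw [if_neg (by omega), if_pos ⟨by omega, rfl⟩, Nat.add_sub_cancel]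
          rw [hval0, hval1]
          unfold lenW
          rw [← hbdef]
          have h0 := Lp_nonneg vs s
          have hb' : 1 ≤ (b : ℤ) := hb
          omega
        · have e1 : r2.getD k 0 = res.getD k 0 := by
            rw [hr2, List.getD_eq_getElem?_getD, List.getElem?_set_ne (by omega)]
            rw [show r1[k]?.getD 0 = r1.getD k 0 from rfl]
            rw [hr1, List.getD_eq_getElem?_getD, List.getElem?_set_ne (by omega)]
            rfl
          rw [e1, hinv k (by omega)]
          unfold valA
          split_ifs <;> first | omega | rfl
    exact ih (s+1) r2 (Lp vs s - 1) (by omega) hlen2 hinv'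
theorem getElem_le_of_le (vs : List String) (hs : vs.Pairwise (· ≤ ·)) {i j : ℕ}
    (hij : i ≤ j) (hj : j < vs.length) : vs[i]'(by omega) ≤ vs[j] := by
  rcases Nat.lt_or_ge i j with h | h
  · exact (List.pairwise_iff_getElem.mp hs) i j (by omega) hj h
  · have : i = j := by omega
    subst this
    exact le_refl _

theorem maxLcp_sorted (vs : List String) (hs : vs.Pairwise (· ≤ ·)) (k : ℕ)
    (hk : k < vs.length) :
    maxLcp (vs.getD k "").toList ((vs.eraseIdx k).map String.toList)
      = max (if k = 0 then 0 else lcp ((vs.getD (k-1) "").toList) ((vs.getD k "").toList))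
            (if k+1 < vs.length then lcp ((vs.getD k "").toList) ((vs.getD (k+1) "").toList) else 0) := by
  rw [List.getD_eq_getElem _ _ hk]
  apply le_antisymm
  · apply maxLcp_le
    intro v hv
    rw [List.mem_map] at hv
    obtain ⟨x, hx, rfl⟩ := hv
    rw [List.mem_eraseIdx_iff_getElem] at hx
    obtain ⟨j, hj, hjk, rfl⟩ := hx
    rcases Nat.lt_or_ge j k with hlt | hge
    · -- j < k: lcp(vs[k], vs[j]) ≤ lcp(vs[k-1], vs[k])
      have hk1 : k - 1 < vs.length := by omega
      have h1 : vs[j] ≤ vs[k-1]'hk1 := getElem_le_of_le vs hs (by omega) hk1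
      have h2 : vs[k-1]'hk1 ≤ vs[k] := getElem_le_of_le vs hs (by omega) hk
      have := (lcp_mono_of_le (String.le_iff_toList_le.mp h1)
        (String.le_iff_toList_le.mp h2)).2
      rw [lcp_comm]
      apply le_max_of_le_left
      rw [if_neg (by omega), List.getD_eq_getElem _ _ hk1]
      exact this
    · -- j > k
      have hgt : k < j := by omega
      have hk1 : k + 1 < vs.length := by omega
      have h1 : vs[k] ≤ vs[k+1]'hk1 := getElem_le_of_le vs hs (by omega) hk1
      have h2 : vs[k+1]'hk1 ≤ vs[j] := getElem_le_of_le vs hs (by omega) hj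
      have := (lcp_mono_of_le (String.le_iff_toList_le.mp h1)
        (String.le_iff_toList_le.mp h2)).1
      apply le_max_of_le_right
      rw [if_pos hk1, List.getD_eq_getElem _ _ hk1]
      exact this
  · apply max_le
    · split_ifs with h0
      · exact Nat.zero_le _
      · have hk1 : k - 1 < vs.length := by omega
        have hmem : vs[k-1]'hk1 ∈ vs.eraseIdx k :=
          List.mem_eraseIdx_iff_getElem.mpr ⟨k-1, hk1, by omega, rfl⟩
        rw [List.getD_eq_getElem vs "" hk1, lcp_comm]
        exact le_maxLcp (List.mem_map_of_mem hmem)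
    · split_ifs with h0
      · have hmem : vs[k+1]'h0 ∈ vs.eraseIdx k :=
          List.mem_eraseIdx_iff_getElem.mpr ⟨k+1, h0, by omega, rfl⟩
        rw [List.getD_eq_getElem _ _ h0]
        exact le_maxLcp (List.mem_map_of_mem hmem)
      · exact Nat.zero_le _
theorem valA_eq_contrib (vs : List String) (hs : vs.Pairwise (· ≤ ·))
    (h2 : 2 ≤ vs.length) (k : ℕ) (hk : k < vs.length) :
    valA vs (vs.length - 1) k = (contribN (vs.getD k "") (vs.erase (vs.getD k "")) : ℤ) := by
  have hperm : (vs.erase (vs.getD k "")).Perm (vs.eraseIdx k) := by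
    rw [List.getD_eq_getElem _ _ hk]
    have hp1 : vs.Perm (vs[k] :: vs.eraseIdx k) := (List.getElem_cons_eraseIdx_perm hk).symm
    have hp2 : vs.Perm (vs[k] :: vs.erase vs[k]) := List.perm_cons_erase (List.getElem_mem hk)
    exact (hp2.symm.trans hp1).cons_inv
  unfold contribN
  rw [maxLcp_perm (hperm.map String.toList)]
  rw [maxLcp_sorted vs hs k hk]
  unfold valA leftL Lp lenW
  have hn : 1 ≤ vs.length - 1 := by omega
  by_cases hk1 : k < vs.length - 1
  · rw [if_pos hk1]
    have hkk : k + 1 < vs.length := by omega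
    rw [if_pos hkk]
    by_cases h0 : k = 0
    · subst h0
      rw [if_pos rfl, if_pos rfl]
      push_cast
      omega
    · rw [if_neg h0, if_neg h0]
      have e : k - 1 + 1 = k := by omega
      rw [e]
      push_cast
      omega
  · rw [if_neg hk1, if_pos ⟨hn, by omega⟩, if_neg (by omega : ¬ k = 0),
      if_neg (by omega : ¬ k + 1 < vs.length)]
    have e : k - 1 + 1 = k := by omega
    rw [e]
    push_cast
    omega
theorem A_eq_T (vs : List String) (hs : vs.Pairwise (· ≤ ·)) (hne : ∀ w ∈ vs, w ≠ "")
    (h2 : 2 ≤ vs.length) :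
    ((solALoop vs (List.range (vs.length - 1)) (List.replicate vs.length (0:Int), 0)).1).sum
      = T vs := by
  rw [List.range_eq_range']
  have hinit : ∀ k, k < vs.length → (List.replicate vs.length (0:ℤ)).getD k 0 = valA vs 0 k := by
    intro k hk
    have hz : (List.replicate vs.length (0:ℤ)).getD k 0 = 0 := by
      rw [List.getD_eq_getElem?_getD, List.getElem?_replicate]
      split_ifs <;> rfl
    rw [hz]
    unfold valA
    rw [if_neg (by omega), if_neg (by rintro ⟨h, _⟩; omega)]
  obtain ⟨hlen, hval⟩ := loop_inv vs hne h2 (vs.length - 1) 0 (List.replicate vs.length 0) 0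
    (by omega) (by simp) hinit
  rw [sum_eq_sum_getD, hlen]
  unfold T
  rw [map_sum_index]
  apply Finset.sum_congr rfl
  intro k hkmem
  rw [Finset.mem_range] at hkmem
  rw [hval k hkmem, valA_eq_contrib vs hs h2 k hkmem]
theorem len_pos_of_ne_empty (w : String) (h : w ≠ "") : 1 ≤ w.toList.length := by
  have hnil : w.toList ≠ [] := by
    intro hn
    apply h
    have h2 := congrArg String.ofList hn
    simpa using h2
  have := List.length_pos_of_ne_nil hnil
  omega

theorem main_eq (words : List String)
    (hpre : words.length ≤ 1 ∨ ∀ w ∈ words, w ≠ "")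
    (hnd : ¬ (words.length = 1 ∧ ¬ ("" ∈ words))) :
    solution words = solution_alt words := by
  rcases Nat.lt_or_ge words.length 2 with hn | hn
  · -- length 0 or 1
    rcases Nat.lt_or_ge words.length 1 with h0 | h1
    · have : words = [] := List.length_eq_zero_iff.mp (by omega)
      subst this
      rfl
    · have hlen1 : words.length = 1 := by omega
      have hmem : "" ∈ words := by
        by_contra hc
        exact hnd ⟨hlen1, hc⟩
      obtain ⟨w, rfl⟩ : ∃ w, words = [w] := by
        cases words with
        | nil => simp at hlen1
        | cons a l =>
          cases l with
          | nil => exact ⟨a, rfl⟩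
          | cons b m => simp at hlen1
      have : w = "" := by simpa using hmem
      subst this
      decide
  · have hne : ∀ w ∈ words, w ≠ "" := by
      rcases hpre with h | h
      · omega
      · exact h
    show ((solALoop (PySem.List.sorted words (fun w => w) false)
        (List.range ((PySem.List.sorted words (fun w => w) false).length - 1))
        (List.replicate (PySem.List.sorted words (fun w => w) false).length (0:Int), 0)).1).sum
      = solution_alt words
    set vs := PySem.List.sorted words (fun w => w) false with hvs
    have hperm : vs.Perm words := PySem.List.sorted_perm words (fun w => w) false
    have hpair : vs.Pairwise (· ≤ ·) := PySem.List.sorted_pairwise words (fun w => w)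
    have hne' : ∀ w ∈ vs, w ≠ "" := fun w hw => hne w (hperm.subset hw)
    have h2 : 2 ≤ vs.length := by rw [hperm.length_eq]; omega
    rw [A_eq_T vs hpair hne' h2, T_perm hperm, ← B_eq_T]

theorem tight (words : List String)
    (hd : words.length = 1 ∧ ¬ ("" ∈ words)) :
    solution words ≠ solution_alt words := by
  obtain ⟨hlen1, hnin⟩ := hd
  obtain ⟨w, rfl⟩ : ∃ w, words = [w] := by
    cases words with
    | nil => simp at hlen1
    | cons a l =>
      cases l with
      | nil => exact ⟨a, rfl⟩
      | cons b m => simp at hlen1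
  have hw : w ≠ "" := by
    intro h
    exact hnin (by simp [h])
  have hA : solution [w] = 0 := by
    show ((solALoop (PySem.List.sorted [w] (fun x => x) false)
        (List.range ((PySem.List.sorted [w] (fun x => x) false).length - 1))
        (List.replicate (PySem.List.sorted [w] (fun x => x) false).length (0:Int), 0)).1).sum = 0
    have hs : PySem.List.sorted [w] (fun x => x) false = [w] := by
      apply PySem.List.sorted_eq_self_of_pairwise
      simp
    rw [hs]
    rfl
  have hB : solution_alt [w] = 1 := by
    rw [B_eq_T]
    unfold T contribN
    rw [List.map_cons, List.map_nil, List.sum_cons, List.sum_nil, List.erase_cons_head,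
      List.map_nil]
    have hlen := len_pos_of_ne_empty w hw
    have : maxLcp w.toList [] = 0 := rfl
    rw [this]
    have : min w.toList.length (0 + 1) = 1 := by omega
    rw [this]
    rfl
  rw [hA, hB]
  omega

-- ===== VERDICT (by name: the statement is the Claim_ definition above) =====
theorem solution_spec : Claim_unchanged_solution := by
  unfold Claim_unchanged_solution
  intro words _ hpre
  unfold Spec_solution
  intro hnd
  exact main_eq words hpre hnd

theorem solution_changed : Claim_changed_solution := by unfold Claim_changed_solution; decide

theorem solution_tight : Claim_exact_solution := by
  unfold Claim_exact_solution
  intro words _ _ hd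
  exact tight words hd
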